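-- pv_equiv track=rewrite | github.com/diegopastor/competitiveProgramming | CodeJam/2018/QR_A.py | totalDamage
-- ===== SOURCE A (Python) =====
-- def totalDamage(s):
--     charge = 1
--     dmg = 0
--     for letter in s:
--         if letter == 'C':
--             charge *= 2
--         if letter == 'S':
--             dmg += charge
--     return dmg
-- ===== SOURCE B (Python) =====
-- def totalDamage(s):
--     acc = 0
--     for letter in reversed(s):
--         if letter == 'S':
--             acc += 1
--         elif letter == 'C':
--             acc *= 2
--     return acc
-- ===== Notes on version B (the rewrite author's own statement) =====
-- stated objective: alternative
-- what changed: B scans the string right-to-left with one accumulator (S adds 1, C doubles everything to its right) instead of A's left-to-right pass maintaining a separate charge multiplier and damage total.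
import Mathlib
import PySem

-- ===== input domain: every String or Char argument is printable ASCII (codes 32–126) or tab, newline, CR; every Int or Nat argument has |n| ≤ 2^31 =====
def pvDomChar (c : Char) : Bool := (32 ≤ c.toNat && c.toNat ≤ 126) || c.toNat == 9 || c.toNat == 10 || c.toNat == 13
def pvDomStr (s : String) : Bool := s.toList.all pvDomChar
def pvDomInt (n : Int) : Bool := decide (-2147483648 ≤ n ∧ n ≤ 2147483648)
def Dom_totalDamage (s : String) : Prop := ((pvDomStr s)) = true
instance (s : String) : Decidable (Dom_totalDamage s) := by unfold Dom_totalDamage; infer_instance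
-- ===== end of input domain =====

-- B replaces A's (charge, damage) state pair by one right-to-left accumulator; alternative decomposition, same cost.

-- ===== PORT A =====
-- state: (charge, dmg); the two ifs of A's loop body, in order
def totalDamageStep (cd : Int × Int) (letter : Char) : Int × Int :=
  let charge := if letter = 'C' then cd.1 * 2 else cd.1
  let dmg := if letter = 'S' then cd.2 + charge else cd.2
  (charge, dmg)

def totalDamage (s : String) : Int :=
  (s.toList.foldl totalDamageStep (1, 0)).2

-- ===== PORT B =====
-- for letter in reversed(s): S → acc+1, C → acc*2
def totalDamageAltStep (acc : Int) (letter : Char) : Int :=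
  if letter = 'S' then acc + 1 else if letter = 'C' then acc * 2 else acc

def totalDamage_alt (s : String) : Int :=
  s.toList.reverse.foldl totalDamageAltStep 0

-- ===== PRECONDITION & SPEC =====
def Spec_totalDamage (s : String) (out : Int) : Prop := out = totalDamage_alt s
instance (s : String) (out : Int) : Decidable (Spec_totalDamage s out) := by unfold Spec_totalDamage; infer_instance

-- ===== CLAIM (what is proved, stated in full; the proofs are below) =====
def Claim_equal_totalDamage : Prop := ∀ (s : String), Dom_totalDamage s → Spec_totalDamage s (totalDamage s)

-- ===== LEMMAS AND PROOFS =====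
-- A's fold with state (c, d) yields d + c * (right-fold value of the tail)
theorem totalDamage_fold_eq (l : List Char) :
    ∀ c d : Int, (l.foldl totalDamageStep (c, d)).2
      = d + c * l.foldr (fun ch a => totalDamageAltStep a ch) 0 := by
  induction l with
  | nil => intro c d; simp
  | cons ch t ih =>
    intro c d
    simp only [List.foldl_cons, List.foldr_cons]
    rw [ih]
    generalize (t.foldr (fun ch a => totalDamageAltStep a ch) 0) = X
    simp only [totalDamageStep, totalDamageAltStep]
    by_cases hC : ch = 'C' <;> by_cases hS : ch = 'S' <;> simp [hC, hS] <;> ring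

theorem totalDamage_spec_aux : ∀ (s : String), totalDamage s = totalDamage_alt s := by
  intro s
  unfold totalDamage totalDamage_alt
  rw [List.foldl_reverse, totalDamage_fold_eq]
  ring

-- ===== VERDICT (by name: the statement is the Claim_ definition above) =====
theorem totalDamage_spec : Claim_equal_totalDamage := by
  intro s _
  exact totalDamage_spec_aux s
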